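-- pv_equiv track=rewrite | github.com/Varun-Rodrigues/Caltech-Course-Tooltip | catalog_processor.py | is_multiline_department_header
-- ===== SOURCE A (Python) =====
-- from typing import Dict, List, Optional, Any, Tuple, Set
--
-- DEPARTMENT_HEADERS: Set[str] = {
--     "AEROSPACE", "ANTHROPOLOGY", "APPLIED AND COMPUTATIONAL MATH",
--     "APPLIED MECHANICS", "APPLIED PHYSICS", "ASTROPHYSICS",
--     "BIOCHEMISTRY AND MOLECULAR BIOPHYSICS", "BIOENGINEERING", "BIOLOGY",
--     "BUSINESS ECONOMICS AND MANAGEMENT", "CHEMICAL ENGINEERING", "CHEMISTRY",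
--     "CIVIL ENGINEERING", "COMPUTATION AND NEURAL SYSTEMS", "COMPUTER SCIENCE",
--     "COMPUTING AND MATHEMATICAL SCIENCES", "CONTROL AND DYNAMICAL SYSTEMS",
--     "ECONOMICS", "ELECTRICAL ENGINEERING", "ENERGY SCIENCE AND TECHNOLOGY",
--     "ENGINEERING", "ENGLISH", "ENGLISH AS A SECOND LANGUAGE",
--     "ENVIRONMENTAL SCIENCE AND ENGINEERING", "FIRST-YEAR SEMINARS",
--     "GEOLOGY", "HISTORY", "HISTORY AND PHILOSOPHY OF SCIENCE", "HUMANITIES",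
--     "INFORMATION AND DATA SCIENCES", "INFORMATION SCIENCE AND TECHNOLOGY",
--     "LANGUAGES", "LAW", "MATERIALS SCIENCE", "MATHEMATICS",
--     "MECHANICAL ENGINEERING", "MEDICAL ENGINEERING", "MUSIC", "NEUROBIOLOGY",
--     "PERFORMING AND VISUAL ARTS", "PHILOSOPHY", "PHYSICAL EDUCATION",
--     "PHYSICS", "POLITICAL SCIENCE", "PSYCHOLOGY",
--     "SCIENTIFIC AND ENGINEERING COMMUNICATION", "SOCIAL SCIENCE",
--     "STUDENT ACTIVITIES", "VISUAL CULTURE", "WRITING"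
-- }
--
-- def is_multiline_department_header(lines: List[str], start_index: int) -> int:
--     """
--     Check if consecutive lines starting at start_index form a department header.
--
--     Some department names span multiple lines in the catalog (e.g., "BUSINESS ECONOMICS" on
--     one line and "AND MANAGEMENT" on the next). This function detects such cases.
--
--     Args:
--         lines: List of all text lines
--         start_index: Starting index to check from
--
--     Returns:
--         Number of lines that form the header (0 if no match found)
--     """
--     if start_index >= len(lines):
--         return 0
--
--     # Try combinations of 2-3 consecutive lines
--     for num_lines in range(2, min(4, len(lines) - start_index + 1)):
--         # Combine the lines with a space
--         combined_lines = []
--         for i in range(num_lines):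
--             line = lines[start_index + i].strip()
--             if not line:  # Skip empty lines
--                 break
--             combined_lines.append(line)
--
--         if len(combined_lines) == num_lines:
--             combined_header = " ".join(combined_lines).upper()
--             if combined_header in DEPARTMENT_HEADERS:
--                 return num_lines
--
--     return 0
-- ===== SOURCE B (Python) =====
-- from typing import List, Set
--
-- DEPARTMENT_HEADERS: Set[str] = {
--     "AEROSPACE", "ANTHROPOLOGY", "APPLIED AND COMPUTATIONAL MATH",
--     "APPLIED MECHANICS", "APPLIED PHYSICS", "ASTROPHYSICS",
--     "BIOCHEMISTRY AND MOLECULAR BIOPHYSICS", "BIOENGINEERING", "BIOLOGY",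
--     "BUSINESS ECONOMICS AND MANAGEMENT", "CHEMICAL ENGINEERING", "CHEMISTRY",
--     "CIVIL ENGINEERING", "COMPUTATION AND NEURAL SYSTEMS", "COMPUTER SCIENCE",
--     "COMPUTING AND MATHEMATICAL SCIENCES", "CONTROL AND DYNAMICAL SYSTEMS",
--     "ECONOMICS", "ELECTRICAL ENGINEERING", "ENERGY SCIENCE AND TECHNOLOGY",
--     "ENGINEERING", "ENGLISH", "ENGLISH AS A SECOND LANGUAGE",
--     "ENVIRONMENTAL SCIENCE AND ENGINEERING", "FIRST-YEAR SEMINARS",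
--     "GEOLOGY", "HISTORY", "HISTORY AND PHILOSOPHY OF SCIENCE", "HUMANITIES",
--     "INFORMATION AND DATA SCIENCES", "INFORMATION SCIENCE AND TECHNOLOGY",
--     "LANGUAGES", "LAW", "MATERIALS SCIENCE", "MATHEMATICS",
--     "MECHANICAL ENGINEERING", "MEDICAL ENGINEERING", "MUSIC", "NEUROBIOLOGY",
--     "PERFORMING AND VISUAL ARTS", "PHILOSOPHY", "PHYSICAL EDUCATION",
--     "PHYSICS", "POLITICAL SCIENCE", "PSYCHOLOGY",
--     "SCIENTIFIC AND ENGINEERING COMMUNICATION", "SOCIAL SCIENCE",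
--     "STUDENT ACTIVITIES", "VISUAL CULTURE", "WRITING"
-- }
--
--
-- def is_multiline_department_header(lines: List[str], start_index: int) -> int:
--     # Single forward pass: collect up to min(3, remaining) stripped lines, stop
--     # at the first blank one; after each append test the joined prefix (2-line
--     # prefix first, then 3-line) against the known header set.
--     if start_index < 0 or start_index >= len(lines):
--         return 0
--     parts: List[str] = []
--     for line in lines[start_index:start_index + min(3, len(lines) - start_index)]:
--         s = line.strip()
--         if not s:
--             break
--         parts.append(s)
--         if len(parts) >= 2 and " ".join(parts).upper() in DEPARTMENT_HEADERS:
--             return len(parts)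
--     return 0
-- ===== Notes on version B (the rewrite author's own statement) =====
-- stated objective: simpler
-- what changed: Replaces A's two nested loops (retrying the 2-line and 3-line combination from scratch, re-stripping the lines each time) by one forward pass that collects stripped lines once, stops at the first blank, and tests the joined 2-line then 3-line prefix as it grows; B also returns 0 for negative start_index instead of wrapping around.
-- outside the precondition, e.g. on is_multiline_department_header(['SCIENCE', 'SOCIAL'], -1): A returns 2, B returns 0; on is_multiline_department_header(['A'], -2): A raises IndexError, B returns 0
import Mathlib
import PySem

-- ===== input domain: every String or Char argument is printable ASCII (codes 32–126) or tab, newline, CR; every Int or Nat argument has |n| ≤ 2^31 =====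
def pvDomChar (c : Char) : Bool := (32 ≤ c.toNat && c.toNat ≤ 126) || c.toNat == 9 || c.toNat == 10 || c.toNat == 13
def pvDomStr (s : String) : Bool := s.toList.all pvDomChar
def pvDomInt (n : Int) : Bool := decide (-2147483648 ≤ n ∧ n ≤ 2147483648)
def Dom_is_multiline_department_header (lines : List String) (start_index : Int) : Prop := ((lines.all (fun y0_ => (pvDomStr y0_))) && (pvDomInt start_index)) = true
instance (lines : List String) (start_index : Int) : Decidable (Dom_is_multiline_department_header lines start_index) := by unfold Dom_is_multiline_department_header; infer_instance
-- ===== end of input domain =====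

-- B replaces A's nested retry-from-scratch loops by one forward pass over at most
-- three stripped lines, testing the growing joined prefix; objective: simpler.


def DEPT_HEADERS : PySem.Set String := PySem.Set.ofList [
  "AEROSPACE", "ANTHROPOLOGY", "APPLIED AND COMPUTATIONAL MATH",
  "APPLIED MECHANICS", "APPLIED PHYSICS", "ASTROPHYSICS",
  "BIOCHEMISTRY AND MOLECULAR BIOPHYSICS", "BIOENGINEERING", "BIOLOGY",
  "BUSINESS ECONOMICS AND MANAGEMENT", "CHEMICAL ENGINEERING", "CHEMISTRY",
  "CIVIL ENGINEERING", "COMPUTATION AND NEURAL SYSTEMS", "COMPUTER SCIENCE",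
  "COMPUTING AND MATHEMATICAL SCIENCES", "CONTROL AND DYNAMICAL SYSTEMS",
  "ECONOMICS", "ELECTRICAL ENGINEERING", "ENERGY SCIENCE AND TECHNOLOGY",
  "ENGINEERING", "ENGLISH", "ENGLISH AS A SECOND LANGUAGE",
  "ENVIRONMENTAL SCIENCE AND ENGINEERING", "FIRST-YEAR SEMINARS",
  "GEOLOGY", "HISTORY", "HISTORY AND PHILOSOPHY OF SCIENCE", "HUMANITIES",
  "INFORMATION AND DATA SCIENCES", "INFORMATION SCIENCE AND TECHNOLOGY",
  "LANGUAGES", "LAW", "MATERIALS SCIENCE", "MATHEMATICS",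
  "MECHANICAL ENGINEERING", "MEDICAL ENGINEERING", "MUSIC", "NEUROBIOLOGY",
  "PERFORMING AND VISUAL ARTS", "PHILOSOPHY", "PHYSICAL EDUCATION",
  "PHYSICS", "POLITICAL SCIENCE", "PSYCHOLOGY",
  "SCIENTIFIC AND ENGINEERING COMMUNICATION", "SOCIAL SCIENCE",
  "STUDENT ACTIVITIES", "VISUAL CULTURE", "WRITING"]

-- ===== PORT A =====
def is_multiline_department_header (lines : List String) (start_index : Int) : Int :=
  if (lines.length : Int) ≤ start_index then 0
  else
    let res : Option Int :=
      (PySem.List.pyRange 2 (min 4 ((lines.length : Int) - start_index + 1)) 1).foldl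
        (fun acc num_lines =>
          match acc with
          | some v => some v
          | none =>
            let st := (PySem.List.pyRange 0 num_lines 1).foldl
              (fun st i =>
                if st.2 then st   -- past Python's 'break'
                else
                  let line := PySem.Str.strip ((PySem.List.pyGet? lines (start_index + i)).getD "")
                  if line = "" then (st.1, true)
                  else (st.1 ++ [line], false))
              (([] : List String), false)
            if (st.1.length : Int) = num_lines then
              if DEPT_HEADERS.contains (PySem.Str.upper (PySem.Str.join " " st.1)) then some num_lines
              else none
            else none)
        none
    res.getD 0

-- ===== PORT B =====
def headerScan (window : List String) (parts : List String) : Int :=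
  match window with
  | [] => 0
  | line :: rest =>
    let s := PySem.Str.strip line
    if s = "" then 0
    else
      let parts' := parts ++ [s]
      if 2 ≤ parts'.length ∧ DEPT_HEADERS.contains (PySem.Str.upper (PySem.Str.join " " parts')) = true
      then (parts'.length : Int)
      else headerScan rest parts'

def is_multiline_department_header_alt (lines : List String) (start_index : Int) : Int :=
  if start_index < 0 ∨ (lines.length : Int) ≤ start_index then 0
  else
    headerScan (PySem.List.slice lines (some start_index)
      (some (start_index + min 3 ((lines.length : Int) - start_index)))) []

-- ===== PRECONDITION & SPEC =====
-- Pre_ restricts to the function's natural domain of nonnegative start indices: for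
-- negative start_index A either raises IndexError (start_index < -len) or reads lines
-- through Python's negative-index wraparound, an accident no caller relies on; B returns 0.
def Pre_is_multiline_department_header (lines : List String) (start_index : Int) : Prop :=
  0 ≤ start_index
instance (lines : List String) (start_index : Int) : Decidable (Pre_is_multiline_department_header lines start_index) := by unfold Pre_is_multiline_department_header; infer_instance
def pvWitness_is_multiline_department_header : List String × Int := (["APPLIED", "MECHANICS"], 0)

def Spec_is_multiline_department_header (lines : List String) (start_index : Int) (out : Int) : Prop := out = is_multiline_department_header_alt lines start_index
instance (lines : List String) (start_index : Int) (out : Int) : Decidable (Spec_is_multiline_department_header lines start_index out) := by unfold Spec_is_multiline_department_header; infer_instance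

-- ===== CLAIM (what is proved, stated in full; the proofs are below) =====
def Claim_equal_is_multiline_department_header : Prop := ∀ (lines : List String) (start_index : Int), Dom_is_multiline_department_header lines start_index → Pre_is_multiline_department_header lines start_index → Spec_is_multiline_department_header lines start_index (is_multiline_department_header lines start_index)

-- ===== LEMMAS AND PROOFS =====

set_option maxRecDepth 4000 in
theorem pv_main (lines : List String) (si : Int) (hpre : 0 ≤ si) :
    is_multiline_department_header lines si = is_multiline_department_header_alt lines si := by
  obtain ⟨k, rfl⟩ : ∃ k : Nat, si = (k : Int) := ⟨si.toNat, by omega⟩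
  by_cases hg : lines.length ≤ k
  · have h1 : ((lines.length:Int) ≤ (k:Int)) := by exact_mod_cast hg
    simp [is_multiline_department_header, is_multiline_department_header_alt, h1]
  · have hk : k < lines.length := by omega
    have hkk : ¬ ((lines.length:Int) ≤ (k:Int)) := by exact_mod_cast hg
    have hwin : PySem.List.slice lines (some (k:Int)) (some ((k:Int) + min 3 ((lines.length:Int) - k)))
        = (lines.drop k).take (min 3 (lines.length - k)) := by
      rw [PySem.List.slice_toNat lines (by omega) (by omega)]
      congr 1 <;> omega
    have hdl : (lines.drop k).length = lines.length - k := List.length_drop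
    have hget : ∀ j : Nat, PySem.List.pyGet? lines ((k:Int) + (j:Int)) = (lines.drop k)[j]? := by
      intro j
      rw [show ((k:Int) + j) = ((k + j : Nat) : Int) by push_cast; ring,
        PySem.List.pyGet?_natCast, List.getElem?_drop]
    have hg0 : PySem.List.pyGet? lines ((k:Int) + 0) = (lines.drop k)[0]? := by exact_mod_cast hget 0
    have hg1 : PySem.List.pyGet? lines ((k:Int) + 1) = (lines.drop k)[1]? := by exact_mod_cast hget 1
    have hg2 : PySem.List.pyGet? lines ((k:Int) + 2) = (lines.drop k)[2]? := by exact_mod_cast hget 2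
    rcases hd : lines.drop k with _ | ⟨a, rest⟩
    · rw [hd] at hdl; simp at hdl; omega
    rcases rest with _ | ⟨b, rest2⟩
    · -- n = 1
      rw [hd] at hdl hg0 hg1 hg2 hwin
      simp at hdl
      have hn : lines.length - k = 1 := by omega
      rw [hn] at hwin
      unfold is_multiline_department_header is_multiline_department_header_alt
      rw [if_neg hkk, if_neg (by omega)]
      rw [show min 4 ((lines.length:Int) - (k:Int) + 1) = 2 by omega,
        show PySem.List.pyRange 2 2 1 = [] from by decide, hwin]
      simp [headerScan]
    rcases rest2 with _ | ⟨c, rest3⟩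
    · -- n = 2
      rw [hd] at hdl hg0 hg1 hg2 hwin
      simp at hdl
      have hn : lines.length - k = 2 := by omega
      rw [hn] at hwin
      unfold is_multiline_department_header is_multiline_department_header_alt
      rw [if_neg hkk, if_neg (by omega)]
      rw [show min 4 ((lines.length:Int) - (k:Int) + 1) = 3 by omega,
        show PySem.List.pyRange 2 3 1 = [2] from by decide, hwin]
      simp only [List.foldl]
      rw [show PySem.List.pyRange 0 2 1 = [0, 1] from by decide]
      simp only [List.foldl, hg0, hg1, List.getElem?_cons_zero, List.getElem?_cons_succ,
        Option.getD_some, Bool.false_eq_true, if_false, List.nil_append]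
      norm_num [hwin]
      by_cases hA : PySem.Str.strip a = "" <;> by_cases hB : PySem.Str.strip b = ""
      all_goals simp [headerScan, hA, hB]
      split_ifs <;> simp
    · -- n ≥ 3
      rw [hd] at hdl hg0 hg1 hg2 hwin
      simp at hdl
      have hn : 3 ≤ lines.length - k := by omega
      rw [show min 3 (lines.length - k) = 3 by omega] at hwin
      unfold is_multiline_department_header is_multiline_department_header_alt
      rw [if_neg hkk, if_neg (by omega)]
      rw [show min 4 ((lines.length:Int) - (k:Int) + 1) = 4 by omega,
        show PySem.List.pyRange 2 4 1 = [2, 3] from by decide, hwin]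
      simp only [List.foldl]
      rw [show PySem.List.pyRange 0 2 1 = [0, 1] from by decide,
        show PySem.List.pyRange 0 3 1 = [0, 1, 2] from by decide]
      simp only [List.foldl, hg0, hg1, hg2, List.getElem?_cons_zero, List.getElem?_cons_succ,
        Option.getD_some, Bool.false_eq_true, if_false, List.nil_append]
      norm_num [hwin]
      by_cases hA : PySem.Str.strip a = "" <;> by_cases hB : PySem.Str.strip b = "" <;>
        by_cases hC : PySem.Str.strip c = ""
      all_goals simp [headerScan, hA, hB, hC]
      all_goals split_ifs <;> simp_all

-- ===== VERDICT (by name: the statement is the Claim_ definition above) =====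
theorem is_multiline_department_header_spec : Claim_equal_is_multiline_department_header := by
  intro lines si _ hpre
  unfold Spec_is_multiline_department_header
  exact pv_main lines si hpre
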